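-- pv_equiv track=rewrite | github.com/jeremiah-c-leary/vhdl-style-guide | vsg/rules/signal/rule_017.py | remove_colon_and_after_tokens
-- ===== SOURCE A (Python) =====
-- def remove_colon_and_after_tokens(lTokens):
--     lReturn = []
--     for sTok in lTokens:
--         if not sTok == ':':
--             lReturn.append(sTok)
--         else:
--             break
--     return lReturn
-- ===== SOURCE B (Python) =====
-- def remove_colon_and_after_tokens(lTokens):
--     if ':' not in lTokens:
--         return list(lTokens)
--     return lTokens[:lTokens.index(':')]
-- ===== Notes on version B (the rewrite author's own statement) =====
-- stated objective: idiomatic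
-- what changed: B locates the first ':' with list.index and returns a prefix slice (or a copy when absent), instead of appending tokens one at a time in a loop with break.
import Mathlib
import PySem

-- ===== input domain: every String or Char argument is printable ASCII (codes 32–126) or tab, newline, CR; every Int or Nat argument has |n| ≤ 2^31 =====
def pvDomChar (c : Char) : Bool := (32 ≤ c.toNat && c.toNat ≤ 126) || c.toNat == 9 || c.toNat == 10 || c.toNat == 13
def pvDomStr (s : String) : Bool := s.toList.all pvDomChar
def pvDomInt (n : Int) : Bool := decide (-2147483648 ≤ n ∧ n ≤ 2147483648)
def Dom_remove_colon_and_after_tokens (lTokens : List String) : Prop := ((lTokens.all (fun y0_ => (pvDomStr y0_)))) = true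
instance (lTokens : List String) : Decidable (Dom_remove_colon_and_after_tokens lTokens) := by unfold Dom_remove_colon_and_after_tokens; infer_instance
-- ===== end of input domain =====

-- B finds the first ':' and returns a prefix slice instead of A's append-until-break loop (objective: idiomatic).
-- ===== PORT A =====
-- loop over lTokens appending until ':' (break), transcribed as structural recursion
def remove_colon_and_after_tokens (lTokens : List String) : List String :=
  match lTokens with
  | [] => []
  | sTok :: rest =>
      if sTok == ":" then [] else sTok :: remove_colon_and_after_tokens rest

-- ===== PORT B =====
-- B: find the first ':' with index and return the prefix slice; copy when absent
def remove_colon_and_after_tokens_alt (lTokens : List String) : List String :=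
  if ":" ∈ lTokens then
    match PySem.List.index? lTokens ":" with
    | some idx => PySem.List.slice lTokens none (some (idx : Int))
    | none => lTokens
  else lTokens

-- ===== PRECONDITION & SPEC =====
def Spec_remove_colon_and_after_tokens (lTokens : List String) (out : List String) : Prop := out = remove_colon_and_after_tokens_alt lTokens
instance (lTokens : List String) (out : List String) : Decidable (Spec_remove_colon_and_after_tokens lTokens out) := by unfold Spec_remove_colon_and_after_tokens; infer_instance

-- ===== CLAIM (what is proved, stated in full; the proofs are below) =====
def Claim_equal_remove_colon_and_after_tokens : Prop := ∀ (lTokens : List String), Dom_remove_colon_and_after_tokens lTokens → Spec_remove_colon_and_after_tokens lTokens (remove_colon_and_after_tokens lTokens)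

-- ===== LEMMAS AND PROOFS =====

-- ===== VERDICT (by name: the statement is the Claim_ definition above) =====
theorem alt_eq (l : List String) :
    remove_colon_and_after_tokens_alt l = remove_colon_and_after_tokens l := by
  induction l with
  | nil => rfl
  | cons x xs ih =>
      by_cases hx : x = ":"
      · subst hx
        simp only [remove_colon_and_after_tokens_alt, List.mem_cons_self, if_true,
          PySem.List.index?_cons_self]
        show PySem.List.slice (":" :: xs) none (some ((0 : Nat) : Int)) = _
        rw [PySem.List.slice_to_natCast]
        simp [remove_colon_and_after_tokens]
      · by_cases h : ":" ∈ xs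
        · obtain ⟨k, hk⟩ := Option.isSome_iff_exists.mp
            ((PySem.List.index?_isSome_iff (xs := xs) (v := ":")).mpr h)
          have ih' : List.take k xs = remove_colon_and_after_tokens xs := by
            rw [remove_colon_and_after_tokens_alt, if_pos h, hk] at ih
            rwa [show (match some k with
                | some idx => PySem.List.slice xs none (some (idx : Int))
                | none => xs) = PySem.List.slice xs none (some ((k : Nat) : Int)) from rfl,
              PySem.List.slice_to_natCast] at ih
          rw [remove_colon_and_after_tokens_alt, if_pos (List.mem_cons_of_mem x h),
            PySem.List.index?_cons_of_ne xs hx, hk, Option.map_some]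
          show PySem.List.slice (x :: xs) none (some ((k + 1 : Nat) : Int)) = _
          rw [PySem.List.slice_to_natCast, List.take_succ_cons, ih']
          simp [remove_colon_and_after_tokens, hx]
        · have hnm : ":" ∉ (x :: xs) := by
            intro hc; rcases List.mem_cons.mp hc with rfl | hc
            · exact hx rfl
            · exact h hc
          rw [remove_colon_and_after_tokens_alt, if_neg h] at ih
          rw [remove_colon_and_after_tokens_alt, if_neg hnm]
          conv_rhs => rw [remove_colon_and_after_tokens]
          rw [if_neg (by simp [hx]), ← ih]

theorem remove_colon_and_after_tokens_spec : Claim_equal_remove_colon_and_after_tokens := by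
  intro l _
  unfold Spec_remove_colon_and_after_tokens
  exact (alt_eq l).symm
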